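-- pv_equiv track=rewrite | github.com/bumblebee211196/lc_contests | contest_296/python/problem1.py | minMaxGame
-- ===== SOURCE A (Python) =====
-- from typing import List
--
-- def minMaxGame(nums: List[int]) -> int:
--     n = len(nums)
--
--     while n > 1:
--         new_nums = []
--         for i in range(n // 2):
--             # Update for even index
--             if i % 2 == 0:
--                 new_nums.append(min(nums[2 * i], nums[2 * i + 1]))
--             # Update for odd index
--             else:
--                 new_nums.append(max(nums[2 * i], nums[2 * i + 1]))
--
--         nums = new_nums[:]
--         n = len(nums)
--
--     return nums[-1]
-- ===== SOURCE B (Python) =====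
-- from typing import List
--
-- def minMaxGame(nums: List[int]) -> int:
--     if len(nums) <= 1:
--         return nums[-1]
--     new = [min(nums[2 * i], nums[2 * i + 1]) if i % 2 == 0
--            else max(nums[2 * i], nums[2 * i + 1])
--            for i in range(len(nums) // 2)]
--     return minMaxGame(new)
-- ===== Notes on version B (the rewrite author's own statement) =====
-- stated objective: simpler
-- what changed: The iterative while-loop that rebuilds the array with an explicit append loop is replaced by a recursive function: one comprehension builds the halved level and the function recurses on it.
import Mathlib
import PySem

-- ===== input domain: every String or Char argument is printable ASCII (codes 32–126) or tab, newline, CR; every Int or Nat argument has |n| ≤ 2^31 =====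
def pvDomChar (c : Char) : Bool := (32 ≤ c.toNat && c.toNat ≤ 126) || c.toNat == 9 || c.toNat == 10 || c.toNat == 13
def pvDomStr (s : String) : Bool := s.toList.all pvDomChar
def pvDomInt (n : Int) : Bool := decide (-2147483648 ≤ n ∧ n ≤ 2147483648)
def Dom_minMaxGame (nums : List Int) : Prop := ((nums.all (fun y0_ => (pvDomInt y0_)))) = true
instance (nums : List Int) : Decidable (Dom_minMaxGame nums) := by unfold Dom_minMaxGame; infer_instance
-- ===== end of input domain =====

-- B replaces A's iterative while-loop (explicit append loop per level) by a
-- recursive function: one mapped level, then recursion on it (objective: simpler).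


-- ===== PORT A =====
-- nums[2*i] / nums[2*i+1]: always in range for i < n/2, so .getD 0 is never taken
def pvIdxA (nums : List Int) (i : Nat) : Int := (PySem.List.pyGet? nums (i : Int)).getD 0

-- one pass of A's for-loop: foldl over range(n//2), appending to new_nums
def pvLevelA (nums : List Int) : List Int :=
  (List.range (nums.length / 2)).foldl (fun acc i =>
    acc ++ [if i % 2 == 0 then min (pvIdxA nums (2 * i)) (pvIdxA nums (2 * i + 1))
            else max (pvIdxA nums (2 * i)) (pvIdxA nums (2 * i + 1))]) []

theorem pvLevelA_foldl_eq (nums : List Int) (n : Nat) (acc : List Int) :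
    (List.range n).foldl (fun acc i =>
      acc ++ [if i % 2 == 0 then min (pvIdxA nums (2 * i)) (pvIdxA nums (2 * i + 1))
              else max (pvIdxA nums (2 * i)) (pvIdxA nums (2 * i + 1))]) acc =
    acc ++ (List.range n).map (fun i =>
      if i % 2 == 0 then min (pvIdxA nums (2 * i)) (pvIdxA nums (2 * i + 1))
      else max (pvIdxA nums (2 * i)) (pvIdxA nums (2 * i + 1))) := by
  induction n generalizing acc with
  | zero => simp
  | succ k ih => rw [List.range_succ, List.foldl_append, ih, List.map_append]; simp

theorem pvLevelA_length (nums : List Int) : (pvLevelA nums).length = nums.length / 2 := by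
  unfold pvLevelA; rw [pvLevelA_foldl_eq]; simp

def minMaxGame (nums : List Int) : Int :=
  if nums.length > 1 then
    minMaxGame (pvLevelA nums)
  else
    (PySem.List.pyGet? nums (-1)).getD 0
termination_by nums.length
decreasing_by simpa [pvLevelA_length] using Nat.div_lt_self (by omega) (by omega)

-- ===== PORT B =====
-- the list comprehension building one level
def pvLevelB (nums : List Int) : List Int :=
  (List.range (nums.length / 2)).map (fun i =>
    if i % 2 == 0 then min (pvIdxA nums (2 * i)) (pvIdxA nums (2 * i + 1))
    else max (pvIdxA nums (2 * i)) (pvIdxA nums (2 * i + 1)))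

theorem pvLevelB_length (nums : List Int) : (pvLevelB nums).length = nums.length / 2 := by
  simp [pvLevelB]

def minMaxGame_alt (nums : List Int) : Int :=
  if nums.length ≤ 1 then
    (PySem.List.pyGet? nums (-1)).getD 0
  else
    minMaxGame_alt (pvLevelB nums)
termination_by nums.length
decreasing_by simpa [pvLevelB_length] using Nat.div_lt_self (by omega) (by omega)

-- ===== PRECONDITION & SPEC =====
-- Pre_ excludes only the empty list, on which A raises IndexError (nums[-1])
def Pre_minMaxGame (nums : List Int) : Prop := nums ≠ []
instance (nums : List Int) : Decidable (Pre_minMaxGame nums) := by unfold Pre_minMaxGame; infer_instance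
def pvWitness_minMaxGame : List Int := ([1, 3, 5, 2])
def Spec_minMaxGame (nums : List Int) (out : Int) : Prop := out = minMaxGame_alt nums
instance (nums : List Int) (out : Int) : Decidable (Spec_minMaxGame nums out) := by unfold Spec_minMaxGame; infer_instance

-- ===== CLAIM (what is proved, stated in full; the proofs are below) =====
def Claim_equal_minMaxGame : Prop := ∀ (nums : List Int), Dom_minMaxGame nums → Pre_minMaxGame nums → Spec_minMaxGame nums (minMaxGame nums)

-- ===== LEMMAS AND PROOFS =====
theorem pvLevel_eq (nums : List Int) : pvLevelA nums = pvLevelB nums := by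
  unfold pvLevelA pvLevelB; rw [pvLevelA_foldl_eq]; simp

theorem minMaxGame_eq_alt (nums : List Int) : minMaxGame nums = minMaxGame_alt nums := by
  induction nums using minMaxGame.induct with
  | case1 nums h ih =>
      rw [minMaxGame, if_pos h, minMaxGame_alt,
        if_neg (show ¬ nums.length ≤ 1 by omega), ← pvLevel_eq]
      exact ih
  | case2 nums h =>
      rw [minMaxGame, if_neg h, minMaxGame_alt, if_pos (show nums.length ≤ 1 by omega)]

-- ===== VERDICT (by name: the statement is the Claim_ definition above) =====
theorem minMaxGame_spec : Claim_equal_minMaxGame := by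
  intro nums _ _
  exact minMaxGame_eq_alt nums
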